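-- pv_equiv track=rewrite | github.com/Anonymous-12-05/DSA-Qs | prepping/Equi.py | solution
-- ===== SOURCE A (Python) =====
-- def sum_rows_equal (lst, candidate):
--     sumprev = 0
--     sumnext = 0
--     for i in range (0, candidate):
--         sumprev += sum (lst[i])
--     for i in range (candidate+1, len(lst)):
--         sumnext += sum(lst[i])
--     return sumprev == sumnext
--
-- def sum_cols_equal (lst, candidate):
--     sumprev = 0
--     sumnext = 0
--     for i in range (0, candidate):
--         sumprev += sum ([row[i] for row in lst])
--     for i in range (candidate+1, len(lst[0])):
--         sumnext += sum ([row[i] for row in lst])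
--     return sumprev == sumnext
--
-- def solution (A):
--     N = len (A)
--     M = len (A[0])
--     count = 0
--     for i in range (1, N-1):
--         for j in range (1, M-1):
--             if sum_rows_equal (A, i) and sum_cols_equal (A, j):
--                 #print (i, j)
--                 count += 1
--     return count
-- ===== SOURCE B (Python) =====
-- def solution(A):
--     N = len(A)
--     M = len(A[0])
--     if N < 3 or M < 3:
--         return 0
--     row_sums = [sum(r) for r in A]
--     total = sum(row_sums)
--     cnt_rows = 0
--     pre = 0
--     for i in range(1, N - 1):
--         pre += row_sums[i - 1]
--         if pre == total - pre - row_sums[i]: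
--             cnt_rows += 1
--     col_sums = [sum(row[j] for row in A) for j in range(M)]
--     cnt_cols = 0
--     pre = 0
--     for j in range(1, M - 1):
--         pre += col_sums[j - 1]
--         if pre == total - pre - col_sums[j]:
--             cnt_cols += 1
--     return cnt_rows * cnt_cols
-- ===== Notes on version B (the rewrite author's own statement) =====
-- stated objective: faster
-- what changed: Instead of re-summing all rows and all columns for every candidate pair (i,j), B computes row/column sums once, counts equilibrium rows and equilibrium columns in single running-prefix passes, and returns the product of the two counts.
-- outside the precondition, e.g. on solution([[0, 1, 0], [-2], [1, -2, 1]]): A returns 0, B raises IndexError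
import Mathlib
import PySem

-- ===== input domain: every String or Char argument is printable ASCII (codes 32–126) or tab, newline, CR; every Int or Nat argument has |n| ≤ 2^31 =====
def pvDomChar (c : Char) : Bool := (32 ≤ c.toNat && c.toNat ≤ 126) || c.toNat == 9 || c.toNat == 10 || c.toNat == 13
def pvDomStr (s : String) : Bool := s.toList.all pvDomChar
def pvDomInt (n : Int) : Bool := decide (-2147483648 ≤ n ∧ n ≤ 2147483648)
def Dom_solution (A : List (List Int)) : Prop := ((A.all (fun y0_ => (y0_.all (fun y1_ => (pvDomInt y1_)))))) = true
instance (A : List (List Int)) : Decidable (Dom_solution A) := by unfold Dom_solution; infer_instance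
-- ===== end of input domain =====

-- B replaces A's quadratic re-summation per candidate pair by one prefix-sum pass per axis and
-- multiplies the two counts (asymptotically faster); equivalence is claimed on nonempty
-- rectangular matrices (plus harmless small ragged ones excluded below).

-- ===== PORT A =====
def sumRowsEqual (lst : List (List Int)) (candidate : Int) : Bool :=
  let sumprev :=
    (PySem.List.pyRange 0 candidate 1).foldl
      (fun s i => s + (PySem.List.pyGetD lst i ([] : List Int)).sum) 0
  let sumnext :=
    (PySem.List.pyRange (candidate + 1) (lst.length : Int) 1).foldl
      (fun s i => s + (PySem.List.pyGetD lst i ([] : List Int)).sum) 0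
  sumprev == sumnext

def sumColsEqual (lst : List (List Int)) (candidate : Int) : Bool :=
  let sumprev :=
    (PySem.List.pyRange 0 candidate 1).foldl
      (fun s i => s + (lst.map (fun row => PySem.List.pyGetD row i (0 : Int))).sum) 0
  let sumnext :=
    (PySem.List.pyRange (candidate + 1) ((PySem.List.pyGetD lst 0 ([] : List Int)).length : Int) 1).foldl
      (fun s i => s + (lst.map (fun row => PySem.List.pyGetD row i (0 : Int))).sum) 0
  sumprev == sumnext

def solution (A : List (List Int)) : Int :=
  let N : Int := (A.length : Int)
  let M : Int := ((PySem.List.pyGetD A 0 ([] : List Int)).length : Int)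
  (PySem.List.pyRange 1 (N - 1) 1).foldl
    (fun count i =>
      (PySem.List.pyRange 1 (M - 1) 1).foldl
        (fun count j => if sumRowsEqual A i && sumColsEqual A j then count + 1 else count)
        count)
    0

-- ===== PORT B =====
def solution_alt (A : List (List Int)) : Int :=
  let N : Int := (A.length : Int)
  let M : Int := ((PySem.List.pyGetD A 0 ([] : List Int)).length : Int)
  if N < 3 || M < 3 then 0
  else
    let rowSums : List Int := A.map List.sum
    let total : Int := rowSums.sum
    let cntRows : Int :=
      ((PySem.List.pyRange 1 (N - 1) 1).foldl
        (fun (st : Int × Int) i =>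
          let pre := st.1 + PySem.List.pyGetD rowSums (i - 1) 0
          (pre, if pre == total - pre - PySem.List.pyGetD rowSums i 0 then st.2 + 1 else st.2))
        (0, 0)).2
    let colSums : List Int :=
      (PySem.List.pyRange 0 M 1).map (fun j => (A.map (fun row => PySem.List.pyGetD row j (0 : Int))).sum)
    let cntCols : Int :=
      ((PySem.List.pyRange 1 (M - 1) 1).foldl
        (fun (st : Int × Int) j =>
          let pre := st.1 + PySem.List.pyGetD colSums (j - 1) 0
          (pre, if pre == total - pre - PySem.List.pyGetD colSums j 0 then st.2 + 1 else st.2))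
        (0, 0)).2
    cntRows * cntCols

-- ===== PRECONDITION & SPEC =====
-- Pre_ excludes the empty matrix (A raises IndexError on A[0]) and ragged matrices of size
-- at least 3×3 (there A usually raises, and where `and` short-circuiting lets A return, A's
-- column reading is an accident of len(A[0]) that B's column sums raise on or disagree with);
-- ragged inputs with fewer than 3 rows or fewer than 3 columns stay inside.
def Pre_solution (A : List (List Int)) : Prop :=
  A ≠ [] ∧ ((∀ r ∈ A, r.length = A.headI.length) ∨ A.length < 3 ∨ A.headI.length < 3)
instance (A : List (List Int)) : Decidable (Pre_solution A) := by unfold Pre_solution; infer_instance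

def pvWitness_solution : List (List Int) := [[1, 2, 1], [0, 4, 0], [1, 2, 1]]

def Spec_solution (A : List (List Int)) (out : Int) : Prop := out = solution_alt A
instance (A : List (List Int)) (out : Int) : Decidable (Spec_solution A out) := by
  unfold Spec_solution; infer_instance

-- ===== CLAIM (what is proved, stated in full; the proofs are below) =====
def Claim_equal_solution : Prop :=
  ∀ (A : List (List Int)), Dom_solution A → Pre_solution A → Spec_solution A (solution A)

-- ===== LEMMAS AND PROOFS =====

-- range segments of a mapped range are take/drop
theorem take_map_pyRange (g : Int → Int) (n i : Nat) (h : i ≤ n) :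
    ((PySem.List.pyRange 0 (n : Int) 1).map g).take i = (PySem.List.pyRange 0 (i : Int) 1).map g := by
  rw [PySem.List.pyRange_one_append 0 (i : Int) (n : Int) (by positivity) (by exact_mod_cast h),
    List.map_append]
  exact List.take_left' (by simp [PySem.List.length_pyRange_one])

theorem drop_map_pyRange (g : Int → Int) (n i : Nat) (h : i ≤ n) :
    ((PySem.List.pyRange 0 (n : Int) 1).map g).drop i = (PySem.List.pyRange (i : Int) (n : Int) 1).map g := by
  rw [PySem.List.pyRange_one_append 0 (i : Int) (n : Int) (by positivity) (by exact_mod_cast h),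
    List.map_append]
  exact List.drop_left' (by simp [PySem.List.length_pyRange_one])

-- characterisation of A's row test
theorem sumRowsEqual_char (A : List (List Int)) (i : Nat) (h : i < A.length) :
    sumRowsEqual A (i : Int)
      = (((A.map List.sum).take i).sum == ((A.map List.sum).drop (i + 1)).sum) := by
  have hg : (PySem.List.pyRange 0 (A.length : Int) 1).map
      (fun k => (PySem.List.pyGetD A k ([] : List Int)).sum) = A.map List.sum := by
    rw [show (fun k => (PySem.List.pyGetD A k ([] : List Int)).sum)
          = (List.sum ∘ fun k => PySem.List.pyGetD A k ([] : List Int)) from rfl,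
        ← List.map_map]
    rw [show ((A.length : Int)) = PySem.List.len A from rfl,
        PySem.List.map_pyGetD_pyRange_zero A ([] : List Int)]
  unfold sumRowsEqual
  rw [PySem.List.foldl_add, PySem.List.foldl_add]
  have h1 : ((PySem.List.pyRange 0 (i : Int) 1).map
      (fun k => (PySem.List.pyGetD A k ([] : List Int)).sum)).sum
      = ((A.map List.sum).take i).sum := by
    rw [← hg, take_map_pyRange _ _ _ (le_of_lt h)]
  have h2 : ((PySem.List.pyRange ((i : Int) + 1) (A.length : Int) 1).map
      (fun k => (PySem.List.pyGetD A k ([] : List Int)).sum)).sum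
      = ((A.map List.sum).drop (i + 1)).sum := by
    rw [← hg, drop_map_pyRange _ _ _ h]
    norm_cast
  simp only [zero_add]
  rw [h1, h2]

-- characterisation of A's column test
theorem sumColsEqual_char (A : List (List Int)) (i : Nat)
    (h : i < (PySem.List.pyGetD A 0 ([] : List Int)).length) :
    sumColsEqual A (i : Int)
      = ((((PySem.List.pyRange 0 ((PySem.List.pyGetD A 0 ([] : List Int)).length : Int) 1).map
            (fun j => (A.map (fun row => PySem.List.pyGetD row j (0 : Int))).sum)).take i).sum
          == (((PySem.List.pyRange 0 ((PySem.List.pyGetD A 0 ([] : List Int)).length : Int) 1).map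
            (fun j => (A.map (fun row => PySem.List.pyGetD row j (0 : Int))).sum)).drop (i + 1)).sum) := by
  unfold sumColsEqual
  rw [PySem.List.foldl_add, PySem.List.foldl_add]
  have h1 : ((PySem.List.pyRange 0 (i : Int) 1).map
      (fun k => (A.map (fun row => PySem.List.pyGetD row k (0 : Int))).sum)).sum
      = (((PySem.List.pyRange 0 ((PySem.List.pyGetD A 0 ([] : List Int)).length : Int) 1).map
            (fun j => (A.map (fun row => PySem.List.pyGetD row j (0 : Int))).sum)).take i).sum := by
    rw [take_map_pyRange _ _ _ (le_of_lt h)]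
  have h2 : ((PySem.List.pyRange ((i : Int) + 1) ((PySem.List.pyGetD A 0 ([] : List Int)).length : Int) 1).map
      (fun k => (A.map (fun row => PySem.List.pyGetD row k (0 : Int))).sum)).sum
      = (((PySem.List.pyRange 0 ((PySem.List.pyGetD A 0 ([] : List Int)).length : Int) 1).map
            (fun j => (A.map (fun row => PySem.List.pyGetD row j (0 : Int))).sum)).drop (i + 1)).sum := by
    rw [drop_map_pyRange _ _ _ h]
    norm_cast
  simp only [zero_add]
  rw [h1, h2]

-- B's prefix-sum counting loop, characterised
theorem cntLoop (s : List Int) (T : Int) (m : Nat) (hm : m ≤ s.length) :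
    (PySem.List.pyRange 1 (1 + (m : Int)) 1).foldl
      (fun (st : Int × Int) i =>
        let pre := st.1 + PySem.List.pyGetD s (i - 1) 0
        (pre, if pre == T - pre - PySem.List.pyGetD s i 0 then st.2 + 1 else st.2))
      (0, 0)
    = ((s.take m).sum,
       ((PySem.List.pyRange 1 (1 + (m : Int)) 1).map
         (fun i => if (s.take i.toNat).sum == T - (s.take i.toNat).sum - PySem.List.pyGetD s i 0
                   then (1 : Int) else 0)).sum) := by
  induction m with
  | zero => simp [PySem.List.pyRange_one_eq_nil]
  | succ m ih =>
    have hm' : m ≤ s.length := by omega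
    have hlt : m < s.length := by omega
    have hsplit : PySem.List.pyRange 1 (1 + ((m : Int) + 1)) 1
        = PySem.List.pyRange 1 (1 + (m : Int)) 1 ++ [1 + (m : Int)] := by
      have h' : (1 + ((m : Int) + 1)) = (1 + (m : Int)) + 1 := by ring
      rw [h', PySem.List.pyRange_one_succ_right (by omega)]
    push_cast
    rw [hsplit, List.foldl_append, List.map_append, List.sum_append, ih hm']
    have hidx1 : PySem.List.pyGetD s (1 + (m : Int) - 1) 0 = s.getD m 0 := by
      have : (1 + (m : Int) - 1) = (m : Int) := by ring
      rw [this, PySem.List.pyGetD_natCast]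
    have hidx2 : PySem.List.pyGetD s (1 + (m : Int)) 0 = s.getD (m + 1) 0 := by
      have : (1 + (m : Int)) = ((m + 1 : Nat) : Int) := by push_cast; ring
      rw [this, PySem.List.pyGetD_natCast]
    have hpre : (s.take m).sum + s.getD m 0 = (s.take (m + 1)).sum := by
      rw [List.sum_take_succ s m hlt, List.getD_eq_getElem s 0 hlt]
    have htn : (1 + (m : Int)).toNat = m + 1 := by omega
    simp only [List.foldl_cons, List.foldl_nil, List.map_cons, List.map_nil, List.sum_cons,
      List.sum_nil, hidx1, hidx2, htn, hpre]
    rw [Prod.mk.injEq]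
    refine ⟨rfl, ?_⟩
    split <;> ring

-- with T the total, B's test is A's equilibrium condition
theorem cond_eq (s : List Int) (i : Nat) (h : i < s.length) :
    ((s.take i).sum == s.sum - (s.take i).sum - PySem.List.pyGetD s (i : Int) 0)
      = ((s.take i).sum == (s.drop (i + 1)).sum) := by
  have hget : PySem.List.pyGetD s (i : Int) 0 = s[i] := by
    rw [PySem.List.pyGetD_natCast, List.getD_eq_getElem s 0 h]
  have hsum : s.sum = (s.take i).sum + s[i] + (s.drop (i + 1)).sum := by
    conv_lhs => rw [← List.take_append_drop i s]
    rw [List.sum_append, List.drop_eq_getElem_cons h, List.sum_cons]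
    ring
  rw [hget, hsum]
  have : (s.take i).sum + s[i] + (s.drop (i + 1)).sum - (s.take i).sum - s[i]
      = (s.drop (i + 1)).sum := by ring
  rw [this]

-- A's inner loop is a guarded count
theorem foldl_if_and (js : List Int) (P : Bool) (Q : Int → Bool) (c : Int) :
    js.foldl (fun c j => if P && Q j then c + 1 else c) c
      = c + (if P then (js.map (fun j => if Q j then (1 : Int) else 0)).sum else 0) := by
  induction js generalizing c with
  | nil => simp
  | cons j js ih =>
    simp only [List.foldl_cons, List.map_cons, List.sum_cons, ih]
    cases P <;> by_cases hq : Q j <;> simp [hq] <;> ring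

theorem sum_ite_scale (is : List Int) (R : Int → Bool) (SQ : Int) :
    (is.map (fun i => if R i then SQ else 0)).sum
      = (is.map (fun i => if R i then (1 : Int) else 0)).sum * SQ := by
  induction is with
  | nil => simp
  | cons i is ih =>
    simp only [List.map_cons, List.sum_cons, ih]
    by_cases hr : R i <;> simp [hr] <;> ring

-- column totals equal row totals on a rectangular matrix
theorem cols_total (A : List (List Int)) (M : Nat) (hrect : ∀ r ∈ A, r.length = M) :
    ((PySem.List.pyRange 0 (M : Int) 1).map
      (fun j => (A.map (fun row => PySem.List.pyGetD row j (0 : Int))).sum)).sum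
    = (A.map List.sum).sum := by
  induction A with
  | nil =>
    simp only [List.map_nil, List.sum_nil]
    rw [PySem.List.sum_map_const_int]
    ring
  | cons r rest ih =>
    have hr : r.length = M := hrect r (by simp)
    have hrest : ∀ x ∈ rest, x.length = M := fun x hx => hrect x (by simp [hx])
    simp only [List.map_cons, List.sum_cons]
    rw [PySem.List.sum_map_add_int (xs := PySem.List.pyRange 0 (M : Int) 1)
        (f := fun j => PySem.List.pyGetD r j (0 : Int))
        (g := fun j => (rest.map (fun row => PySem.List.pyGetD row j (0 : Int))).sum)]
    rw [ih hrest]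
    have : (PySem.List.pyRange 0 (M : Int) 1).map (fun j => PySem.List.pyGetD r j (0 : Int)) = r := by
      rw [← hr, show ((r.length : Int)) = PySem.List.len r from rfl]
      exact PySem.List.map_pyGetD_pyRange_zero r (0 : Int)
    rw [this]

-- B's counting loop equals the indicator sum of an equilibrium test
theorem cnt_eq_count (s : List Int) (n : Nat) (test : Int → Bool)
    (hlen : s.length = n) (hn : 3 ≤ n)
    (hchar : ∀ (k : Nat), k < n → test (k : Int) = ((s.take k).sum == (s.drop (k + 1)).sum)) :
    ((PySem.List.pyRange 1 ((n : Int) - 1) 1).foldl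
      (fun (st : Int × Int) i =>
        let pre := st.1 + PySem.List.pyGetD s (i - 1) 0
        (pre, if pre == s.sum - pre - PySem.List.pyGetD s i 0 then st.2 + 1 else st.2))
      (0, 0)).2
    = ((PySem.List.pyRange 1 ((n : Int) - 1) 1).map
        (fun i => if test i then (1 : Int) else 0)).sum := by
  have hcast : (n : Int) - 1 = 1 + ((n - 2 : Nat) : Int) := by omega
  rw [hcast, cntLoop s s.sum (n - 2) (by omega)]
  refine congrArg List.sum (List.map_congr_left ?_)
  intro i hi
  obtain ⟨hi1, hi2⟩ := PySem.List.mem_pyRange_one.1 hi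
  obtain ⟨k, rfl⟩ : ∃ k : Nat, i = (k : Int) :=
    ⟨i.toNat, (Int.toNat_of_nonneg (by omega)).symm⟩
  have hk : k < n := by omega
  have hk' : k < s.length := by omega
  simp only [Int.toNat_natCast]
  simp only [cond_eq s k hk', ← hchar k hk]

-- ===== VERDICT (by name: the statement is the Claim_ definition above) =====
theorem solution_spec : Claim_equal_solution := by
  intro A _ hPre
  obtain ⟨hne, hsh⟩ := hPre
  unfold Spec_solution
  by_cases hdeg : (A.length : Int) < 3 ∨ ((PySem.List.pyGetD A 0 ([] : List Int)).length : Int) < 3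
  · have hB : solution_alt A = 0 := by
      simp only [solution_alt]
      rw [if_pos]
      rcases hdeg with h | h <;> simp [h]
    have hA : solution A = 0 := by
      simp only [solution]
      rcases hdeg with h | h
      · rw [PySem.List.pyRange_one_eq_nil (a := 1) (b := (A.length : Int) - 1) (by omega)]
        rfl
      · rw [PySem.List.pyRange_one_eq_nil (a := 1)
            (b := ((PySem.List.pyGetD A 0 ([] : List Int)).length : Int) - 1) (by omega)]
        simp only [List.foldl_nil]
        exact List.foldl_fixed _
    rw [hA, hB]
  · push Not at hdeg
    obtain ⟨hN3, hM3⟩ := hdeg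
    have hMhead : A.headI.length = (PySem.List.pyGetD A 0 ([] : List Int)).length := by
      cases A with
      | nil => exact absurd rfl hne
      | cons a as => rw [PySem.List.pyGetD_zero_cons]; rfl
    have hrect : ∀ r ∈ A, r.length = (PySem.List.pyGetD A 0 ([] : List Int)).length := by
      rcases hsh with h | h | h
      · intro r hr; rw [← hMhead]; exact h r hr
      · omega
      · rw [hMhead] at h; omega
    have hA : solution A =
        ((PySem.List.pyRange 1 ((A.length : Int) - 1) 1).map
          (fun i => if sumRowsEqual A i then (1 : Int) else 0)).sum *
        ((PySem.List.pyRange 1 (((PySem.List.pyGetD A 0 ([] : List Int)).length : Int) - 1) 1).map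
          (fun j => if sumColsEqual A j then (1 : Int) else 0)).sum := by
      simp only [solution]
      rw [PySem.List.foldl_congr_mem _ _
          (fun (c : Int) i => c +
            (if sumRowsEqual A i then
              ((PySem.List.pyRange 1 (((PySem.List.pyGetD A 0 ([] : List Int)).length : Int) - 1) 1).map
                (fun j => if sumColsEqual A j then (1 : Int) else 0)).sum
             else 0)) 0
          (fun acc x _ => foldl_if_and _ _ _ acc)]
      rw [PySem.List.foldl_add, zero_add, sum_ite_scale]
    rw [hA]
    simp only [solution_alt]
    rw [if_neg (by simp; omega)]
    have htot :
        ((PySem.List.pyRange 0 ((PySem.List.pyGetD A 0 ([] : List Int)).length : Int) 1).map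
          (fun j => (A.map (fun row => PySem.List.pyGetD row j (0 : Int))).sum)).sum
        = (A.map List.sum).sum :=
      cols_total A _ hrect
    rw [cnt_eq_count (A.map List.sum) A.length (fun i => sumRowsEqual A i)
        (by simp) (by omega)
        (fun k hk => sumRowsEqual_char A k hk)]
    rw [← htot]
    rw [cnt_eq_count _ (PySem.List.pyGetD A 0 ([] : List Int)).length (fun j => sumColsEqual A j)
        (by simp [PySem.List.length_pyRange_one]) (by omega)
        (fun k hk => sumColsEqual_char A k hk)]
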